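-- pv_equiv track=rewrite | github.com/MirageM/HackerRankCertificates | HackerRank_Problem_Solving_Intermediate/maxSubarrayValue.py | maxSubarrayValue
-- ===== SOURCE A (Python) =====
-- def maxSubarrayValue(arr):
-- 	even = [0]
-- 	odd = [0]
-- 	for i in range(len(arr)):
-- 		if i % 2 == 0:
-- 			even.append(even[-1] + arr[i])
-- 			odd.append(odd[-1])
-- 		else:
-- 			even.append(even[-1])
-- 			odd.append(odd[-1] + arr[i])
-- 	ans = 0
-- 	for i in range(len(arr)):
-- 		for j in range(i + 1, len(arr) + 1):
-- 			a = even[j] - even[i]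
-- 			b = odd[j] - odd[i]
-- 			ans = max(ans, (a-b)**2)
-- 	return ans
-- ===== SOURCE B (Python) =====
-- def maxSubarrayValue(arr):
--     # d_k = (sum of even-index elems) - (sum of odd-index elems) over the first k
--     # elements; the answer is (max(d) - min(d)) ** 2, found in one pass.
--     s = 0
--     mx = 0
--     mn = 0
--     sign = 1
--     for x in arr:
--         s += sign * x
--         sign = -sign
--         mx = max(mx, s)
--         mn = min(mn, s)
--     return (mx - mn) ** 2
-- ===== Notes on version B (the rewrite author's own statement) =====
-- stated objective: faster
-- what changed: Replaces the quadratic scan over all subarray endpoint pairs with a single pass over the alternating-sign prefix sums, keeping only their running max and min; the answer is (max-min)^2.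
import Mathlib
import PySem

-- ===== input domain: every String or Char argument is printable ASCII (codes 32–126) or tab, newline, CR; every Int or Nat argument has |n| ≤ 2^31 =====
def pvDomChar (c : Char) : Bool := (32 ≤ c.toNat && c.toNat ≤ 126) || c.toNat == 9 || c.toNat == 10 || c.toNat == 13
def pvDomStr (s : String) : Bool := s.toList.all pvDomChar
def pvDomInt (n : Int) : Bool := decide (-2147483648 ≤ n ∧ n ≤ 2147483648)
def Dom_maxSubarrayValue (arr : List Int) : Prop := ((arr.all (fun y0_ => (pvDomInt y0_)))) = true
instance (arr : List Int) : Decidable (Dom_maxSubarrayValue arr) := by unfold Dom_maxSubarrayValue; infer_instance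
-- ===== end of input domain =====

-- B replaces A's quadratic scan over all subarray endpoint pairs by one pass over the
-- alternating-sign prefix sums, tracking only their running max and min (faster: asymptotic).

-- ===== PORT A =====
-- first loop of A: builds the `even` and `odd` prefix-sum lists (appended at the end,
-- even[-1] / odd[-1] ported as getLastD; the lists start [0] so they are never empty)
def pvBuildEO : List Int → Nat → List Int → List Int → List Int × List Int
  | [], _, e, o => (e, o)
  | x :: rest, i, e, o =>
    if i % 2 = 0 then
      pvBuildEO rest (i + 1) (e ++ [e.getLastD 0 + x]) (o ++ [o.getLastD 0])
    else
      pvBuildEO rest (i + 1) (e ++ [e.getLastD 0]) (o ++ [o.getLastD 0 + x])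

-- Python indexing even[i], even[j] is always in range (i < n, j ≤ n, lists have length n+1),
-- so it is ported exactly by getD.
def maxSubarrayValue (arr : List Int) : Int :=
  let n := arr.length
  let eo := pvBuildEO arr 0 [0] [0]
  (List.range n).foldl (fun ans i =>
    (List.range' (i + 1) (n - i)).foldl (fun ans j =>
      let a := eo.1.getD j 0 - eo.1.getD i 0
      let b := eo.2.getD j 0 - eo.2.getD i 0
      max ans ((a - b) ^ 2)) ans) 0

-- ===== PORT B =====
def maxSubarrayValue_alt (arr : List Int) : Int :=
  let st := arr.foldl (fun (st : Int × Int × Int × Int) x =>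
      let s := st.1 + st.2.2.2 * x
      (s, max st.2.1 s, min st.2.2.1 s, -st.2.2.2)) (0, 0, 0, 1)
  (st.2.1 - st.2.2.1) ^ 2

-- ===== PRECONDITION & SPEC =====
def Spec_maxSubarrayValue (arr : List Int) (out : Int) : Prop := out = maxSubarrayValue_alt arr
instance (arr : List Int) (out : Int) : Decidable (Spec_maxSubarrayValue arr out) := by unfold Spec_maxSubarrayValue; infer_instance

-- ===== CLAIM (what is proved, stated in full; the proofs are below) =====
def Claim_equal_maxSubarrayValue : Prop := ∀ (arr : List Int), Dom_maxSubarrayValue arr → Spec_maxSubarrayValue arr (maxSubarrayValue arr)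

-- ===== LEMMAS AND PROOFS =====

-- the list of alternating-sign prefix sums, starting from s with current sign g
def pvDl (s g : Int) : List Int → List Int
  | [] => [s]
  | x :: r => s :: pvDl (s + g * x) (-g) r

theorem pvDl_cons (l : List Int) (s g : Int) :
    pvDl s g l = s :: (pvDl s g l).tail := by
  cases l <;> simp [pvDl]

theorem pvDl_length (l : List Int) (s g : Int) :
    (pvDl s g l).length = l.length + 1 := by
  induction l generalizing s g with
  | nil => simp [pvDl]
  | cons x r ih => simp [pvDl, ih]

theorem pvBuildEO_len (arr : List Int) : ∀ (i : Nat) (e o : List Int),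
    (pvBuildEO arr i e o).1.length = e.length + arr.length ∧
    (pvBuildEO arr i e o).2.length = o.length + arr.length := by
  induction arr with
  | nil => intro i e o; simp [pvBuildEO]
  | cons x r ih =>
    intro i e o
    by_cases h : i % 2 = 0 <;>
      simp [pvBuildEO, h, ih] <;> omega

theorem pvBuildEO_zip (arr : List Int) : ∀ (i : Nat) (e o : List Int),
    e.length = o.length → e ≠ [] →
    List.zipWith (· - ·) (pvBuildEO arr i e o).1 (pvBuildEO arr i e o).2 =
      List.zipWith (· - ·) e o ++
        (pvDl (e.getLastD 0 - o.getLastD 0) (if i % 2 = 0 then 1 else -1) arr).tail := by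
  induction arr with
  | nil => intro i e o _ _; simp [pvBuildEO, pvDl]
  | cons x r ih =>
    intro i e o hlen hne
    by_cases h : i % 2 = 0
    · have h1 : (i + 1) % 2 ≠ 0 := by omega
      rw [pvBuildEO]
      simp only [h, if_true]
      rw [ih (i + 1) (e ++ [e.getLastD 0 + x]) (o ++ [o.getLastD 0])
            (by simp [hlen]) (by simp)]
      rw [List.zipWith_append hlen]
      simp only [List.getLastD_concat, if_neg h1]
      rw [pvDl]
      simp only [List.tail_cons]
      rw [pvDl_cons r]
      simp [List.zipWith]
      ring_nf
      rw [← pvDl_cons]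
    · have h1 : (i + 1) % 2 = 0 := by omega
      rw [pvBuildEO]
      simp only [h, if_false]
      rw [ih (i + 1) (e ++ [e.getLastD 0]) (o ++ [o.getLastD 0 + x])
            (by simp [hlen]) (by simp)]
      rw [List.zipWith_append hlen]
      simp only [List.getLastD_concat, if_pos h1]
      rw [pvDl]
      simp only [List.tail_cons]
      rw [pvDl_cons r]
      simp [List.zipWith]
      ring_nf
      rw [← pvDl_cons]

-- foldl-with-max toolbox
theorem pv_foldl_max_le {α : Type} (g : α → Int) (l : List α) :
    ∀ (a c : Int), a ≤ c → (∀ x ∈ l, g x ≤ c) →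
    l.foldl (fun acc x => max acc (g x)) a ≤ c := by
  induction l with
  | nil => intro a c ha _; simpa using ha
  | cons y r ih =>
    intro a c ha h
    simp only [List.foldl_cons]
    exact ih _ _ (max_le ha (h y (by simp))) (fun x hx => h x (by simp [hx]))

theorem pv_le_foldl_max_init {α : Type} (g : α → Int) (l : List α) :
    ∀ (a : Int), a ≤ l.foldl (fun acc x => max acc (g x)) a := by
  induction l with
  | nil => intro a; simp
  | cons y r ih =>
    intro a
    simp only [List.foldl_cons]
    exact le_trans (le_max_left _ _) (ih _)

theorem pv_le_foldl_max_mem {α : Type} (g : α → Int) (l : List α) :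
    ∀ (a : Int) (x : α), x ∈ l → g x ≤ l.foldl (fun acc x => max acc (g x)) a := by
  induction l with
  | nil => intro a x hx; simp at hx
  | cons y r ih =>
    intro a x hx
    simp only [List.foldl_cons]
    rcases List.mem_cons.mp hx with h | h
    · subst h; exact le_trans (le_max_right _ _) (pv_le_foldl_max_init _ _ _)
    · exact ih _ _ h

theorem pv_foldl_max_mem_or (l : List Int) :
    ∀ (a : Int), l.foldl max a = a ∨ l.foldl max a ∈ l := by
  induction l with
  | nil => intro a; simp
  | cons y r ih =>
    intro a
    simp only [List.foldl_cons]
    rcases ih (max a y) with h | h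
    · rcases max_choice a y with h' | h'
      · left; rw [h, h']
      · right; rw [h, h']; simp
    · right; simp [h]

theorem pv_foldl_min_mem_or (l : List Int) :
    ∀ (a : Int), l.foldl min a = a ∨ l.foldl min a ∈ l := by
  induction l with
  | nil => intro a; simp
  | cons y r ih =>
    intro a
    simp only [List.foldl_cons]
    rcases ih (min a y) with h | h
    · rcases min_choice a y with h' | h'
      · left; rw [h, h']
      · right; rw [h, h']; simp
    · right; simp [h]

theorem pv_foldl_max_mem_le (l : List Int) :
    ∀ (a : Int) (x : Int), x ∈ l → x ≤ l.foldl max a :=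
  fun a x hx => pv_le_foldl_max_mem (fun y => y) l a x hx

theorem pv_foldl_min_le_init {α : Type} (g : α → Int) (l : List α) :
    ∀ (a : Int), l.foldl (fun acc x => min acc (g x)) a ≤ a := by
  induction l with
  | nil => intro a; simp
  | cons y r ih =>
    intro a
    simp only [List.foldl_cons]
    exact le_trans (ih _) (min_le_left _ _)

theorem pv_foldl_min_le {α : Type} (g : α → Int) (l : List α) :
    ∀ (a : Int) (x : α), x ∈ l → l.foldl (fun acc x => min acc (g x)) a ≤ g x := by
  induction l with
  | nil => intro a x hx; simp at hx
  | cons y r ih =>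
    intro a x hx
    simp only [List.foldl_cons]
    rcases List.mem_cons.mp hx with h | h
    · subst h
      exact le_trans (pv_foldl_min_le_init g r _) (min_le_right a (g x))
    · exact ih _ _ h

theorem pv_foldl_min_mem_le (l : List Int) :
    ∀ (a : Int) (x : Int), x ∈ l → l.foldl min a ≤ x :=
  fun a x hx => pv_foldl_min_le (fun y => y) l a x hx

-- flattening the nested loop of A
def pvPairs (n : Nat) : List (Nat × Nat) :=
  (List.range n).flatMap (fun i => (List.range' (i + 1) (n - i)).map (fun j => (i, j)))

theorem pv_nested_eq_flat (f : Nat → Nat → Int) (n : Nat) :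
    ∀ (a : Int),
    (List.range n).foldl (fun ans i =>
        (List.range' (i + 1) (n - i)).foldl (fun acc j => max acc (f i j)) ans) a
      = (pvPairs n).foldl (fun acc p => max acc (f p.1 p.2)) a := by
  have key : ∀ (L : List Nat) (a : Int),
      L.foldl (fun ans i =>
        (List.range' (i + 1) (n - i)).foldl (fun acc j => max acc (f i j)) ans) a
      = (L.flatMap (fun i => (List.range' (i + 1) (n - i)).map (fun j => (i, j)))).foldl
          (fun acc p => max acc (f p.1 p.2)) a := by
    intro L
    induction L with
    | nil => intro a; simp
    | cons y r ih =>
      intro a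
      simp only [List.foldl_cons, List.flatMap_cons, List.foldl_append, ih, List.foldl_map]
  intro a; exact key _ a

theorem pv_mem_pairs (n : Nat) (p : Nat × Nat) :
    p ∈ pvPairs n ↔ p.1 < p.2 ∧ p.2 ≤ n := by
  obtain ⟨i, j⟩ := p
  simp only [pvPairs, List.mem_flatMap, List.mem_map, List.mem_range, List.mem_range'_1]
  constructor
  · rintro ⟨i', hi', j', ⟨hj1, hj2⟩, h⟩
    cases h
    omega
  · rintro ⟨h1, h2⟩
    exact ⟨i, by omega, j, by omega, rfl⟩

-- B's fold computes max/min over the tail of the prefix-sum list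
theorem pvAlt_fold (l : List Int) :
    ∀ (s mx mn g : Int),
    ((l.foldl (fun (st : Int × Int × Int × Int) x =>
        let s := st.1 + st.2.2.2 * x
        (s, max st.2.1 s, min st.2.2.1 s, -st.2.2.2)) (s, mx, mn, g)).2.1
      = (pvDl s g l).tail.foldl max mx) ∧
    ((l.foldl (fun (st : Int × Int × Int × Int) x =>
        let s := st.1 + st.2.2.2 * x
        (s, max st.2.1 s, min st.2.2.1 s, -st.2.2.2)) (s, mx, mn, g)).2.2.1
      = (pvDl s g l).tail.foldl min mn) := by
  induction l with
  | nil => intro s mx mn g; simp [pvDl]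
  | cons x r ih =>
    intro s mx mn g
    simp only [List.foldl_cons, pvDl, List.tail_cons]
    rw [pvDl_cons r]
    simp only [List.foldl_cons]
    exact ih (s + g * x) (max mx (s + g * x)) (min mn (s + g * x)) (-g)

-- getD of the zipWith difference list
theorem pv_zip_getD (E O : List Int) (k : Nat)
    (hE : k < E.length) (hO : k < O.length) :
    (List.zipWith (· - ·) E O).getD k 0 = E.getD k 0 - O.getD k 0 := by
  rw [List.getD_eq_getElem _ _ (by simp [List.length_zipWith]; omega),
      List.getD_eq_getElem _ _ hE, List.getD_eq_getElem _ _ hO,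
      List.getElem_zipWith]

-- main characterisation of A
theorem pvA_eq (arr : List Int) :
    maxSubarrayValue arr =
      (pvPairs arr.length).foldl
        (fun acc p => max acc (((pvDl 0 1 arr).getD p.2 0 - (pvDl 0 1 arr).getD p.1 0) ^ 2)) 0 := by
  have hzip : List.zipWith (· - ·) (pvBuildEO arr 0 [0] [0]).1 (pvBuildEO arr 0 [0] [0]).2
      = pvDl 0 1 arr := by
    have := pvBuildEO_zip arr 0 [0] [0] (by simp) (by simp)
    simp only [List.getLastD] at this
    rw [this]
    simp only [List.zipWith, sub_self]
    rw [pvDl_cons arr 0 1]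
    simp
  have hlen := pvBuildEO_len arr 0 [0] [0]
  unfold maxSubarrayValue
  rw [pv_nested_eq_flat]
  rw [PySem.List.foldl_congr_mem]
  intro acc p hp
  obtain ⟨h1, h2⟩ := (pv_mem_pairs arr.length p).mp hp
  have hE1 : p.1 < (pvBuildEO arr 0 [0] [0]).1.length := by simp [hlen.1]; omega
  have hE2 : p.2 < (pvBuildEO arr 0 [0] [0]).1.length := by simp [hlen.1]; omega
  have hO1 : p.1 < (pvBuildEO arr 0 [0] [0]).2.length := by simp [hlen.2]; omega
  have hO2 : p.2 < (pvBuildEO arr 0 [0] [0]).2.length := by simp [hlen.2]; omega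
  rw [← hzip, pv_zip_getD _ _ _ hE2 hO2, pv_zip_getD _ _ _ hE1 hO1]
  ring_nf

-- main characterisation of B
theorem pvB_eq (arr : List Int) :
    maxSubarrayValue_alt arr =
      ((pvDl 0 1 arr).foldl max 0 - (pvDl 0 1 arr).foldl min 0) ^ 2 := by
  unfold maxSubarrayValue_alt
  obtain ⟨h1, h2⟩ := pvAlt_fold arr 0 0 0 1
  simp only [h1, h2]
  rw [pvDl_cons arr 0 1]
  simp

theorem maxSubarrayValue_eq_alt (arr : List Int) :
    maxSubarrayValue arr = maxSubarrayValue_alt arr := by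
  rw [pvA_eq, pvB_eq]
  set D := pvDl 0 1 arr with hD
  set M := D.foldl max 0 with hM
  set m := D.foldl min 0 with hm
  have hDlen : D.length = arr.length + 1 := pvDl_length arr 0 1
  have h0mem : (0 : Int) ∈ D := by rw [hD, pvDl_cons arr 0 1]; simp
  have hMmem : M ∈ D := by
    rcases pv_foldl_max_mem_or D 0 with h | h
    · rw [hM, h]; exact h0mem
    · rw [hM]; exact h
  have hmmem : m ∈ D := by
    rcases pv_foldl_min_mem_or D 0 with h | h
    · rw [hm, h]; exact h0mem
    · rw [hm]; exact h
  have hub : ∀ x ∈ D, x ≤ M := fun x hx => pv_foldl_max_mem_le D 0 x hx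
  have hlb : ∀ x ∈ D, m ≤ x := fun x hx => pv_foldl_min_mem_le D 0 x hx
  have hgetD_mem : ∀ k, k ≤ arr.length → D.getD k 0 ∈ D := by
    intro k hk
    rw [List.getD_eq_getElem _ _ (by omega)]
    exact List.getElem_mem _
  apply le_antisymm
  · -- every pair term is at most (M - m)^2
    apply pv_foldl_max_le
    · positivity
    · intro p hp
      obtain ⟨h1, h2⟩ := (pv_mem_pairs arr.length p).mp hp
      have ha := hgetD_mem p.1 (by omega)
      have hb := hgetD_mem p.2 (by omega)
      have h3 := hub _ ha; have h4 := hlb _ ha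
      have h5 := hub _ hb; have h6 := hlb _ hb
      have := sq_le_sq' (by omega : -(M - m) ≤ D.getD p.2 0 - D.getD p.1 0)
        (by omega : D.getD p.2 0 - D.getD p.1 0 ≤ M - m)
      simpa [sq] using this
  · by_cases hMm : M = m
    · rw [hMm]; simp
      exact pv_le_foldl_max_init _ _ 0
    · obtain ⟨iM, hiM, hiMv⟩ := List.mem_iff_getElem.mp hMmem
      obtain ⟨im, him, himv⟩ := List.mem_iff_getElem.mp hmmem
      have hne : iM ≠ im := by
        intro h; subst h; apply hMm; rw [← hiMv, ← himv]
      have hgM : D.getD iM 0 = M := by rw [List.getD_eq_getElem _ _ hiM]; exact hiMv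
      have hgm : D.getD im 0 = m := by rw [List.getD_eq_getElem _ _ him]; exact himv
      rcases Nat.lt_or_ge iM im with hlt | hge
      · have hmem : (iM, im) ∈ pvPairs arr.length := by
          rw [pv_mem_pairs]; constructor
          · exact hlt
          · omega
        have := pv_le_foldl_max_mem
          (fun p : Nat × Nat => ((pvDl 0 1 arr).getD p.2 0 - (pvDl 0 1 arr).getD p.1 0) ^ 2)
          (pvPairs arr.length) 0 (iM, im) hmem
        simp only [← hD] at this
        rw [hgM, hgm] at this
        calc (M - m) ^ 2 = (m - M) ^ 2 := by ring
          _ ≤ _ := this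
      · have hlt : im < iM := by omega
        have hmem : (im, iM) ∈ pvPairs arr.length := by
          rw [pv_mem_pairs]; constructor
          · exact hlt
          · omega
        have := pv_le_foldl_max_mem
          (fun p : Nat × Nat => ((pvDl 0 1 arr).getD p.2 0 - (pvDl 0 1 arr).getD p.1 0) ^ 2)
          (pvPairs arr.length) 0 (im, iM) hmem
        simp only [← hD] at this
        rw [hgM, hgm] at this
        exact this

-- ===== VERDICT (by name: the statement is the Claim_ definition above) =====
theorem maxSubarrayValue_spec : Claim_equal_maxSubarrayValue := by
  intro arr _
  unfold Spec_maxSubarrayValue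
  exact maxSubarrayValue_eq_alt arr
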